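-- pv_equiv track=rewrite | github.com/Hallyson34/uPython2 | leiturawhile.py | verificarCiclo
-- ===== SOURCE A (Python) =====
-- def verificarCiclo(v,n):
--     ciclos = 0
--     i = 0
--     while i < len(v):
--         if v[i] == "R":
--             ciclos+=1
--             j = i + 1
--             cont = 1
--             while j<len(v) and v[j] == "R" and cont < n:
--                 cont+=1
--                 j+=1
--             i = j
--         else:
--             ciclos+=1
--             i += 1
--     return ciclos
-- ===== SOURCE B (Python) =====
-- def verificarCiclo(v, n):
--     # Single pass with a pending R-run counter; each finished R-run of length L
--     # costs ceil(L / max(n,1)) cycles, every non-R element costs 1.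
--     m = n if n > 1 else 1
--     ciclos = 0
--     run = 0
--     for x in v:
--         if x == "R":
--             run += 1
--         else:
--             ciclos += (run + m - 1) // m + 1
--             run = 0
--     return ciclos + (run + m - 1) // m
-- ===== Notes on version B (the rewrite author's own statement) =====
-- stated objective: alternative
-- what changed: Replaces A's nested index-jumping while-loops (inner loop walks up to n consecutive R's per cycle) by a single for-loop that accumulates the length of the current R-run and charges each finished run a closed-form ceiling division ceil(L/max(n,1)), counting non-R elements as 1.
import Mathlib
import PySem

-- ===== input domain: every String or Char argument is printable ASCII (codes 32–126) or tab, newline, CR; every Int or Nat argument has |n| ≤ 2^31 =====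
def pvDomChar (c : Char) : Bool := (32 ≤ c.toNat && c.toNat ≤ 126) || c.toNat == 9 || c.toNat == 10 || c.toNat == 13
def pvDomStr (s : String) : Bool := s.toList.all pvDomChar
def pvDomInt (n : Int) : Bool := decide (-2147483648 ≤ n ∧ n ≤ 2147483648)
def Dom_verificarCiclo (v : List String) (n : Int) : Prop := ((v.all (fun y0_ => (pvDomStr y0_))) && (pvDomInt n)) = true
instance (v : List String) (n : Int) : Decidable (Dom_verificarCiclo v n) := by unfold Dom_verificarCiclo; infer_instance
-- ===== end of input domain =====

-- B replaces A's nested index-jumping while-loops by a single pass that accumulates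
-- the pending R-run and closes it with a ceiling division (same cost, different algorithm).

-- ===== PORT A =====
-- inner while: j < len(v) and v[j] == "R" and cont < n
def vcInner (v : List String) (n : Int) (j : Nat) (cont : Int) : Nat :=
  if h : j < v.length ∧ v.getD j "" == "R" ∧ cont < n then
    vcInner v n (j + 1) (cont + 1)
  else j
termination_by v.length - j
decreasing_by obtain ⟨h1, -, -⟩ := h; omega

-- the inner loop never moves j backwards (needed for the outer loop's termination)
theorem vcInner_ge (v : List String) (n : Int) (j : Nat) (cont : Int) :
    j ≤ vcInner v n j cont := by
  fun_induction vcInner v n j cont with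
  | case1 j cont h ih => omega
  | case2 j cont h => omega

-- outer while: i < len(v)
def vcLoop (v : List String) (n : Int) (i : Nat) (ciclos : Int) : Int :=
  if h : i < v.length then
    if v.getD i "" == "R" then
      vcLoop v n (vcInner v n (i + 1) 1) (ciclos + 1)
    else
      vcLoop v n (i + 1) (ciclos + 1)
  else ciclos
termination_by v.length - i
decreasing_by
  · have := vcInner_ge v n (i + 1) 1; omega
  · omega

def verificarCiclo (v : List String) (n : Int) : Int := vcLoop v n 0 0

-- ===== PORT B =====
-- Source B's loop body: extend the pending R-run, or close it with a ceiling division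
def altStep (m : Int) (s : Int × Int) (x : String) : Int × Int :=
  if x == "R" then (s.1, s.2 + 1)
  else (s.1 + PySem.Int.floordiv (s.2 + m - 1) m + 1, 0)

def verificarCiclo_alt (v : List String) (n : Int) : Int :=
  let m : Int := if 1 < n then n else 1
  let s := v.foldl (altStep m) (0, 0)
  s.1 + PySem.Int.floordiv (s.2 + m - 1) m

-- ===== PRECONDITION & SPEC =====
def Spec_verificarCiclo (v : List String) (n : Int) (out : Int) : Prop := out = verificarCiclo_alt v n
instance (v : List String) (n : Int) (out : Int) : Decidable (Spec_verificarCiclo v n out) := by unfold Spec_verificarCiclo; infer_instance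

-- ===== CLAIM (what is proved, stated in full; the proofs are below) =====
def Claim_equal_verificarCiclo : Prop := ∀ (v : List String) (n : Int), Dom_verificarCiclo v n → Spec_verificarCiclo v n (verificarCiclo v n)

-- ===== LEMMAS AND PROOFS =====

-- proof-only intermediate: both programs' counts, organised by maximal runs
def altGo (m : Int) : List String → Int
  | [] => 0
  | x :: xs =>
    let run : Nat := 1 + (xs.takeWhile (fun y => y == x)).length
    (if x == "R" then PySem.Int.floordiv ((run : Int) + m - 1) m else (run : Int))
      + altGo m (xs.dropWhile (fun y => y == x))
termination_by l => l.length
decreasing_by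
  have := List.length_dropWhile_le (fun y => y == x) xs
  simp only [List.length_cons]; omega

-- closed form of the inner while-loop
theorem vcInner_eq (v : List String) (n : Int) (j : Nat) (cont : Int) :
    vcInner v n j cont
      = j + min ((v.drop j).takeWhile (fun y => y == "R")).length (n - cont).toNat := by
  fun_induction vcInner v n j cont with
  | case1 j cont h ih =>
    obtain ⟨h1, h2, h3⟩ := h
    have hd : v.drop j = v[j] :: v.drop (j + 1) := List.drop_eq_getElem_cons h1
    have hg : v.getD j "" = v[j] := List.getD_eq_getElem v "" h1
    have hR : v[j] = "R" := by
      have := eq_of_beq h2; rwa [hg] at this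
    rw [hd, hR]
    simp only [List.takeWhile_cons, beq_self_eq_true, if_true, List.length_cons, ih]
    omega
  | case2 j cont _h =>
    by_cases h1 : j < v.length
    · by_cases h3 : cont < n
      · have hg : v.getD j "" = v[j] := List.getD_eq_getElem v "" h1
        have h2 : ¬ (v.getD j "" == "R") = true := by tauto
        have hd : v.drop j = v[j] :: v.drop (j + 1) := List.drop_eq_getElem_cons h1
        rw [hd]
        simp only [List.takeWhile_cons]
        rw [hg] at h2
        simp [h2]
      · have : (n - cont).toNat = 0 := by omega
        simp [this]
    · have : v.drop j = [] := List.drop_eq_nil_of_le (by omega)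
      simp [this]

-- takeWhile/dropWhile through a replicate prefix that satisfies the predicate
theorem tw_replicate (q : Nat) (rest : List String) :
    (List.replicate q "R" ++ rest).takeWhile (fun y => y == "R")
      = List.replicate q "R" ++ rest.takeWhile (fun y => y == "R") := by
  induction q with
  | zero => simp
  | succ q ih => simp [List.replicate_succ, ih]

theorem dw_replicate (q : Nat) (rest : List String) :
    (List.replicate q "R" ++ rest).dropWhile (fun y => y == "R")
      = rest.dropWhile (fun y => y == "R") := by
  induction q with
  | zero => simp
  | succ q ih => simp [List.replicate_succ, ih]

-- the R-prefix of any list is literally a replicate of "R"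
theorem takeWhile_R_eq_replicate (l : List String) :
    l.takeWhile (fun y => y == "R")
      = List.replicate (l.takeWhile (fun y => y == "R")).length "R" := by
  rw [List.eq_replicate_iff]
  refine ⟨rfl, fun b hb => ?_⟩
  have := List.mem_takeWhile_imp hb
  exact eq_of_beq this

-- a list whose R-takeWhile is empty is fixed by R-dropWhile
theorem dw_of_tw_nil (l : List String)
    (h : l.takeWhile (fun y => y == "R") = []) :
    l.dropWhile (fun y => y == "R") = l := by
  cases l with
  | nil => rfl
  | cons a t =>
    by_cases ha : (a == "R") = true
    · simp [ha] at h
    · simp [ha]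

-- ceiling division, rewritten through floor division
theorem ceil_closed (m a : Int) (hm : 0 < m) :
    PySem.Int.floordiv (a + m - 1) m = (a - 1) / m + 1 := by
  rw [PySem.Int.floordiv_eq_ediv_of_pos hm]
  have : a + m - 1 = (a - 1) + 1 * m := by ring
  rw [this, Int.add_mul_ediv_right _ _ (by omega)]

theorem ceil_one (m a : Int) (hm : 0 < m) (h1 : 1 ≤ a) (h2 : a ≤ m) :
    PySem.Int.floordiv (a + m - 1) m = 1 := by
  rw [ceil_closed m a hm, Int.ediv_eq_zero_of_lt (by omega) (by omega)]
  omega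

theorem ceil_step (m a : Int) (hm : 0 < m) (h : m < a) :
    PySem.Int.floordiv (a + m - 1) m
      = 1 + PySem.Int.floordiv ((a - m) + m - 1) m := by
  rw [ceil_closed m a hm, ceil_closed m (a - m) hm]
  have : a - 1 = (a - m - 1) + 1 * m := by ring
  rw [this, Int.add_mul_ediv_right _ _ (by omega)]
  ring

-- evaluating altGo on a nonempty pure-R prefix followed by a run-free remainder
theorem altGo_replicate (m : Int) (s : Nat) (rest : List String)
    (hs : 0 < s) (hr : rest.takeWhile (fun y => y == "R") = []) :
    altGo m (List.replicate s "R" ++ rest)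
      = PySem.Int.floordiv ((s : Int) + m - 1) m + altGo m rest := by
  obtain ⟨q, rfl⟩ : ∃ q, s = q + 1 := ⟨s - 1, by omega⟩
  rw [List.replicate_succ, List.cons_append]
  simp only [altGo, tw_replicate, dw_replicate, hr, dw_of_tw_nil rest hr,
    beq_self_eq_true, if_true, List.append_nil, List.length_replicate]
  rw [Nat.add_comm]

-- a non-R head run of altGo can be consumed one element at a time
theorem altGo_non_R (m : Int) (x : String) (hx : ¬ (x == "R") = true) (l : List String) :
    altGo m l
      = ((l.takeWhile (fun y => y == x)).length : Int)
        + altGo m (l.dropWhile (fun y => y == x)) := by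
  cases l with
  | nil => simp [altGo]
  | cons y ys =>
    by_cases hy : (y == x) = true
    · have hyx : y = x := eq_of_beq hy
      subst hyx
      rw [List.takeWhile_cons, List.dropWhile_cons]
      simp only [beq_self_eq_true, if_true, List.length_cons, altGo]
      rw [if_neg hx]
      push_cast; ring
    · simp [List.dropWhile_cons, hy]

theorem ceil_zero (m : Int) (hm : 0 < m) :
    PySem.Int.floordiv (0 + m - 1) m = 0 := by
  rw [show (0 : Int) + m - 1 = m - 1 by ring, PySem.Int.floordiv_eq_ediv_of_pos hm]
  exact Int.ediv_eq_zero_of_lt (by omega) (by omega)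

-- peeling off the (possibly empty) leading R-run of altGo
theorem altGo_R_prefix (m : Int) (hm : 0 < m) (l : List String) :
    altGo m l
      = PySem.Int.floordiv (((l.takeWhile (fun y => y == "R")).length : Int) + m - 1) m
        + altGo m (l.dropWhile (fun y => y == "R")) := by
  cases l with
  | nil =>
    simp only [List.takeWhile_nil, List.dropWhile_nil, List.length_nil, Nat.cast_zero, altGo]
    rw [ceil_zero m hm]
    ring
  | cons x xs =>
    by_cases hx : (x == "R") = true
    · have : x = "R" := eq_of_beq hx
      subst this
      simp only [altGo, List.takeWhile_cons, List.dropWhile_cons, beq_self_eq_true,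
        if_true, List.length_cons]
      rw [Nat.add_comm]
    · simp only [List.takeWhile_cons, List.dropWhile_cons, if_neg hx,
        List.length_nil, Nat.cast_zero]
      rw [ceil_zero m hm]
      ring

-- a non-R element always contributes exactly one cycle
theorem altGo_cons_non_R (m : Int) (x : String) (xs : List String)
    (hx : ¬ (x == "R") = true) :
    altGo m (x :: xs) = 1 + altGo m xs := by
  have h1 := altGo_non_R m x hx (x :: xs)
  have h2 := altGo_non_R m x hx xs
  rw [List.takeWhile_cons, List.dropWhile_cons] at h1
  simp only [beq_self_eq_true, if_true, List.length_cons] at h1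
  rw [h1, h2]
  push_cast; ring

-- B's fold with a pending run r in flight, versus the run decomposition
theorem foldl_altStep_eq (m : Int) (hm : 0 < m) (l : List String) :
    ∀ (c r : Int), 0 ≤ r →
      (l.foldl (altStep m) (c, r)).1
        + PySem.Int.floordiv ((l.foldl (altStep m) (c, r)).2 + m - 1) m
      = c + PySem.Int.floordiv ((r + ((l.takeWhile (fun y => y == "R")).length : Int)) + m - 1) m
        + altGo m (l.dropWhile (fun y => y == "R")) := by
  induction l with
  | nil => intro c r _; simp [altGo]
  | cons x xs ih =>
    intro c r hr
    by_cases hx : (x == "R") = true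
    · have : x = "R" := eq_of_beq hx
      subst this
      simp only [List.foldl_cons, altStep, beq_self_eq_true, if_true]
      rw [ih c (r + 1) (by omega)]
      simp only [List.takeWhile_cons, List.dropWhile_cons, beq_self_eq_true, if_true,
        List.length_cons]
      have harg : r + 1 + ((xs.takeWhile (fun y => y == "R")).length : Int) + m - 1
          = r + (((xs.takeWhile (fun y => y == "R")).length + 1 : Nat) : Int) + m - 1 := by
        push_cast; ring
      rw [harg]
    · simp only [List.foldl_cons, altStep, if_neg hx]
      rw [ih _ 0 le_rfl]
      simp only [List.takeWhile_cons, List.dropWhile_cons, if_neg hx,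
        List.length_nil, Nat.cast_zero, zero_add, add_zero]
      rw [altGo_cons_non_R m x xs hx, altGo_R_prefix m hm xs]
      ring

-- the main correspondence: A's loop from index i equals the run scan on the suffix
theorem vcLoop_eq_altGo (v : List String) (n : Int) (i : Nat) (c : Int) :
    vcLoop v n i c = c + altGo (if 1 < n then n else 1) (v.drop i) := by
  set m : Int := if 1 < n then n else 1 with hmdef
  have hm : 0 < m := by rw [hmdef]; split <;> omega
  fun_induction vcLoop v n i c with
  | case1 i c h1 h2 ih =>
    -- v[i] = "R"
    have hg : v.getD i "" = v[i] := List.getD_eq_getElem v "" h1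
    have hR : v[i] = "R" := by have := eq_of_beq h2; rwa [hg] at this
    have hd : v.drop i = "R" :: v.drop (i + 1) := by
      rw [List.drop_eq_getElem_cons h1, hR]
    set xs := v.drop (i + 1) with hxs
    set t := (xs.takeWhile (fun y => y == "R")).length with ht
    set rest := xs.dropWhile (fun y => y == "R") with hrest
    have hxsdec : xs = List.replicate t "R" ++ rest := by
      conv_lhs => rw [← List.takeWhile_append_dropWhile (p := fun y => y == "R") (l := xs)]
      rw [← takeWhile_R_eq_replicate]
    have hrtw : rest.takeWhile (fun y => y == "R") = [] := by
      rw [hrest]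
      cases hcase : xs.dropWhile (fun y => y == "R") with
      | nil => rfl
      | cons a as =>
        have : ¬ ((fun y => y == "R") a) = true := by
          have := List.head?_dropWhile_not (fun y => y == "R") xs
          rw [hcase] at this; simpa using this
        simp [this]
    -- the inner loop's landing index
    have hj : vcInner v n (i + 1) 1 = (i + 1) + min t (n - 1).toNat := by
      rw [vcInner_eq]
    have hk : ((min t (n - 1).toNat : Nat) : Int) = min (t : Int) (m - 1) := by
      rw [hmdef]; split <;> push_cast <;> omega
    have hdropj : v.drop (vcInner v n (i + 1) 1)
        = List.replicate (t - min t (n - 1).toNat) "R" ++ rest := by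
      rw [hj, ← List.drop_drop, ← hxs, hxsdec,
          List.drop_append_of_le_length (by simp),
          List.drop_replicate]
    rw [ih, hdropj, hd]
    have hfull : altGo m ("R" :: xs)
        = PySem.Int.floordiv (((t + 1 : Nat) : Int) + m - 1) m + altGo m rest := by
      have : ("R" :: xs) = List.replicate (t + 1) "R" ++ rest := by
        rw [List.replicate_succ, List.cons_append, ← hxsdec]
      rw [this, altGo_replicate m (t + 1) rest (by omega) hrtw]
    rw [hfull]
    by_cases hcase : t ≤ (n - 1).toNat
    · have hmin : min t (n - 1).toNat = t := by omega
      rw [hmin, Nat.sub_self, List.replicate_zero, List.nil_append,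
          ceil_one m _ hm (by push_cast; omega)
            (by have := hk; rw [hmin] at this; push_cast at this ⊢; omega)]
      ring
    · have hmin : min t (n - 1).toNat = (n - 1).toNat := by omega
      have hpos : 0 < t - (n - 1).toNat := by omega
      rw [hmin, altGo_replicate m _ rest hpos hrtw]
      have hma : m < ((t + 1 : Nat) : Int) := by
        rw [hmin] at hk; push_cast at hk ⊢; omega
      rw [ceil_step m _ hm hma]
      have harg : ((t + 1 : Nat) : Int) - m = ((t - (n - 1).toNat : Nat) : Int) := by
        rw [hmin] at hk; push_cast [Nat.sub_add_cancel] at hk ⊢ <;> omega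
      rw [harg]; ring
  | case2 i c h1 h2 ih =>
    -- v[i] ≠ "R"
    have hg : v.getD i "" = v[i] := List.getD_eq_getElem v "" h1
    have hd : v.drop i = v[i] :: v.drop (i + 1) := List.drop_eq_getElem_cons h1
    have hx : ¬ (v[i] == "R") = true := by rwa [hg] at h2
    rw [ih, hd]
    have hN := altGo_non_R m (v[i]) hx (v.drop (i + 1))
    simp only [altGo]
    rw [if_neg hx, hN]
    push_cast; ring
  | case3 i c h1 =>
    have : v.drop i = [] := List.drop_eq_nil_of_le (by omega)
    simp [this, altGo]

-- ===== VERDICT (by name: the statement is the Claim_ definition above) =====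
theorem verificarCiclo_spec : Claim_equal_verificarCiclo := by
  intro v n _
  show verificarCiclo v n = verificarCiclo_alt v n
  have hm : (0 : Int) < if 1 < n then n else 1 := by split <;> omega
  rw [verificarCiclo, vcLoop_eq_altGo, List.drop_zero, zero_add]
  show altGo (if 1 < n then n else 1) v
      = (v.foldl (altStep (if 1 < n then n else 1)) (0, 0)).1
        + PySem.Int.floordiv ((v.foldl (altStep (if 1 < n then n else 1)) (0, 0)).2
            + (if 1 < n then n else 1) - 1) (if 1 < n then n else 1)
  rw [foldl_altStep_eq _ hm v 0 0 le_rfl, altGo_R_prefix _ hm v]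
  simp only [zero_add]
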